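-- pv_equiv track=rewrite | github.com/ashleybetchart/mcb185_homework | 64profinder.py | getpro
-- ===== SOURCE A (Python) =====
-- def getpro(aa, size):
-- 	subset = []
-- 	for orf in aa.split('*'):
-- 		if 'M' in orf:
-- 			start = orf.find('M')
-- 			protein = orf[start:]
-- 			if len(protein) >= size:
-- 				subset.append(protein)
-- 	return subset
-- ===== SOURCE B (Python) =====
-- def getpro(aa, size):
--     # single left-to-right scan: no split(), no per-segment find()
--     out = []
--     cur = None  # protein being built (from first 'M' of the current segment), or None
--     for ch in aa:
--         if ch == '*':
--             if cur is not None and len(cur) >= size: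
--                 out.append(cur)
--             cur = None
--         elif cur is not None:
--             cur += ch
--         elif ch == 'M':
--             cur = 'M'
--     if cur is not None and len(cur) >= size:
--         out.append(cur)
--     return out
-- ===== Notes on version B (the rewrite author's own statement) =====
-- stated objective: alternative
-- what changed: Replaced split('*') + per-segment find('M') + slicing with a single character-by-character scan that builds each protein in flight and flushes it at each '*' and at end of string.
import Mathlib
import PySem

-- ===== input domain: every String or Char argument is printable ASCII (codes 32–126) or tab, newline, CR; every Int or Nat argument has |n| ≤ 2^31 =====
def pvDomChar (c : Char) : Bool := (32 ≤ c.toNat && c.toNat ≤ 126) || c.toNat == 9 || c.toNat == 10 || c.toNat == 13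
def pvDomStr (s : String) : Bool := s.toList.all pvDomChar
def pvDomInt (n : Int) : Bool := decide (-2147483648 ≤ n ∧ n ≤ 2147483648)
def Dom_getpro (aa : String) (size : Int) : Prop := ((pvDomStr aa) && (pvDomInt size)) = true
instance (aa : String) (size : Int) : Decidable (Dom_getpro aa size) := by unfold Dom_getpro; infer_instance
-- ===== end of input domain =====

-- B replaces split('*') + per-segment find('M')/slice with a single character scan
-- that builds each protein in flight (alternative decomposition, same O(n) cost).


-- ===== PORT A =====
-- literal transliteration of A: for orf in aa.split('*'): if 'M' in orf: start = orf.find('M');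
-- protein = orf[start:]; if len(protein) >= size: subset.append(protein)
def getpro (aa : String) (size : Int) : List String :=
  (PySem.Chars.splitOn aa.toList ['*']).foldl
    (fun subset orf =>
      if PySem.Chars.isIn ['M'] orf then
        let start := PySem.Chars.find orf ['M']
        let protein := PySem.Chars.slice orf (some start) none
        if size ≤ PySem.Chars.len protein then subset ++ [String.ofList protein] else subset
      else subset) []

-- ===== PORT B =====
-- B's flush: append cur if it is a protein of sufficient length
def getproFlush (out : List String) (cur : Option (List Char)) (size : Int) : List String :=
  match cur with
  | some cs => if size ≤ (cs.length : Int) then out ++ [String.ofList cs] else out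
  | none => out

-- B's loop: one pass over the characters, cur = protein under construction
def getproGo (size : Int) : List Char → List String → Option (List Char) → List String
  | [], out, cur => getproFlush out cur size
  | ch :: rest, out, cur =>
    if ch = '*' then getproGo size rest (getproFlush out cur size) none
    else
      match cur with
      | some cs => getproGo size rest out (some (cs ++ [ch]))
      | none => if ch = 'M' then getproGo size rest out (some ['M']) else getproGo size rest out none

def getpro_alt (aa : String) (size : Int) : List String :=
  getproGo size aa.toList [] none

-- ===== PRECONDITION & SPEC =====
def Spec_getpro (aa : String) (size : Int) (out : List String) : Prop := out = getpro_alt aa size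
instance (aa : String) (size : Int) (out : List String) : Decidable (Spec_getpro aa size out) := by unfold Spec_getpro; infer_instance

-- ===== CLAIM (what is proved, stated in full; the proofs are below) =====
def Claim_equal_getpro : Prop := ∀ (aa : String) (size : Int), Dom_getpro aa size → Spec_getpro aa size (getpro aa size)

-- ===== LEMMAS AND PROOFS =====

-- recursive characterisation of splitting on a single character
def splitStar (k : Char) : List Char → List (List Char)
  | [] => [[]]
  | c :: rest => if c = k then [] :: splitStar k rest else (splitStar k rest).modifyHead (c :: ·)

theorem splitStar_ne_nil (k : Char) (l : List Char) : splitStar k l ≠ [] := by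
  induction l with
  | nil => simp [splitStar]
  | cons c rest ih =>
    simp only [splitStar]
    split_ifs
    · simp
    · cases h : splitStar k rest with
      | nil => exact absurd h ih
      | cons a t => simp [List.modifyHead]

theorem splitStar_intercalate (k : Char) (l : List Char) :
    List.intercalate [k] (splitStar k l) = l := by
  induction l with
  | nil => simp [splitStar, List.intercalate]
  | cons c rest ih =>
    simp only [splitStar]
    split_ifs with hc
    · subst hc
      cases h : splitStar c rest with
      | nil => exact absurd h (splitStar_ne_nil c rest)
      | cons a t =>
        rw [h] at ih
        simp only [List.intercalate] at ih ⊢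
        simp [List.intersperse, ← ih]
    · cases h : splitStar k rest with
      | nil => exact absurd h (splitStar_ne_nil k rest)
      | cons a t =>
        rw [h] at ih
        simp only [List.intercalate] at ih ⊢
        cases t with
        | nil => simpa using congrArg (c :: ·) ih
        | cons b t' =>
          simp only [List.modifyHead, List.intersperse] at ih ⊢
          simpa using congrArg (c :: ·) ih

theorem splitStar_starFree (k : Char) (l : List Char) :
    ∀ seg ∈ splitStar k l, k ∉ seg := by
  induction l with
  | nil => simp [splitStar]
  | cons c rest ih =>
    simp only [splitStar]
    split_ifs with hc
    · intro seg hseg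
      rcases List.mem_cons.mp hseg with h | h
      · simp [h]
      · exact ih seg h
    · cases h : splitStar k rest with
      | nil => exact absurd h (splitStar_ne_nil k rest)
      | cons a t =>
        intro seg hseg
        rcases List.mem_cons.mp hseg with h' | h'
        · subst h'
          intro hk
          rcases List.mem_cons.mp hk with h'' | h''
          · exact hc h''.symm
          · exact ih a (h ▸ List.mem_cons_self) h''
        · exact ih seg (h ▸ List.mem_cons_of_mem a h')

-- splitOn.go with enough fuel computes splitStar
theorem splitOn_go_eq (k : Char) (fuel : Nat) (l cur : List Char) (acc : List (List Char))
    (hf : l.length ≤ fuel) :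
    PySem.Chars.splitOn.go [k] fuel l cur acc
      = acc.reverse ++ (splitStar k l).modifyHead (cur.reverse ++ ·) := by
  induction fuel generalizing l cur acc with
  | zero =>
    have : l = [] := List.eq_nil_of_length_eq_zero (Nat.le_zero.mp hf)
    subst this
    simp [PySem.Chars.splitOn.go, splitStar, List.modifyHead]
  | succ fuel ih =>
    cases l with
    | nil => simp [PySem.Chars.splitOn.go, splitStar, List.modifyHead]
    | cons c rest =>
      simp only [PySem.Chars.splitOn.go]
      by_cases hc : c = k
      · subst hc
        rw [if_pos (by simp [List.isPrefixOf])]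
        rw [show List.drop ([c] : List Char).length (c :: rest) = rest by simp]
        rw [ih rest [] (cur.reverse :: acc) (Nat.le_of_succ_le_succ (by simpa using hf))]
        cases h : splitStar c rest with
        | nil => exact absurd h (splitStar_ne_nil c rest)
        | cons a t => simp [splitStar, h, List.modifyHead]
      · rw [if_neg (by simp [List.isPrefixOf]; intro h; exact hc h.symm)]
        rw [ih rest (c :: cur) acc (Nat.le_of_succ_le_succ (by simpa using hf))]
        simp only [splitStar, if_neg hc]
        congr 1
        cases h : splitStar k rest with
        | nil => exact absurd h (splitStar_ne_nil k rest)
        | cons a t => simp [List.modifyHead]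

theorem splitOn_eq_splitStar (k : Char) (l : List Char) :
    PySem.Chars.splitOn l [k] = splitStar k l := by
  unfold PySem.Chars.splitOn
  rw [splitOn_go_eq k (l.length + 1) l [] [] (by omega)]
  cases h : splitStar k l with
  | nil => exact absurd h (splitStar_ne_nil k l)
  | cons a t => simp [List.modifyHead]

-- B's in-segment scan
def scanSeg : List Char → Option (List Char) → Option (List Char)
  | [], cur => cur
  | c :: rest, cur =>
    match cur with
    | some cs => scanSeg rest (some (cs ++ [c]))
    | none => if c = 'M' then scanSeg rest (some ['M']) else scanSeg rest none

theorem scanSeg_some (p cs : List Char) : scanSeg p (some cs) = some (cs ++ p) := by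
  induction p generalizing cs with
  | nil => simp [scanSeg]
  | cons c rest ih => simp [scanSeg, ih]

theorem scanSeg_none_of_not_mem (p : List Char) (h : 'M' ∉ p) : scanSeg p none = none := by
  induction p with
  | nil => simp [scanSeg]
  | cons c rest ih =>
    simp only [scanSeg]
    rw [if_neg (fun hc => h (by simp [hc])), ih (fun hm => h (List.mem_cons_of_mem c hm))]

theorem scanSeg_none_split (a b : List Char) (ha : 'M' ∉ a) :
    scanSeg (a ++ 'M' :: b) none = some ('M' :: b) := by
  induction a with
  | nil => simp [scanSeg, scanSeg_some]
  | cons c rest ih =>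
    simp only [List.cons_append, scanSeg]
    rw [if_neg (fun hc => ha (by simp [hc]))]
    exact ih (fun hm => ha (List.mem_cons_of_mem c hm))

-- singleton infix ↔ membership
theorem singleton_infix_iff (x : Char) (l : List Char) : [x] <:+: l ↔ x ∈ l := by
  constructor
  · rintro ⟨s, t, h⟩
    subst h; simp
  · intro h
    rcases List.mem_iff_append.mp h with ⟨s, t, h⟩
    exact ⟨s, t, by simp [h]⟩

theorem dropWhile_mem_decomp (orf : List Char) (hm : 'M' ∈ orf) :
    ∃ b, orf.dropWhile (· ≠ 'M') = 'M' :: b := by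
  induction orf with
  | nil => simp at hm
  | cons c rest ih =>
    by_cases hc : c = 'M'
    · subst hc
      exact ⟨rest, by rw [List.dropWhile_cons_of_neg (by simp)]⟩
    · rcases List.mem_cons.mp hm with h | h
      · exact absurd h.symm hc
      · obtain ⟨b, hb⟩ := ih h
        exact ⟨b, by rw [List.dropWhile_cons_of_pos (by simp [hc])]; exact hb⟩

-- per-segment: A's body equals flushing B's scan state
theorem stepA_eq (size : Int) (subset : List String) (orf : List Char) :
    (if PySem.Chars.isIn ['M'] orf then
        let start := PySem.Chars.find orf ['M']
        let protein := PySem.Chars.slice orf (some start) none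
        if size ≤ PySem.Chars.len protein then subset ++ [String.ofList protein] else subset
      else subset)
      = getproFlush subset (scanSeg orf none) size := by
  by_cases hm : 'M' ∈ orf
  · have hin : PySem.Chars.isIn ['M'] orf = true :=
      (PySem.Chars.isIn_iff_infix _ _).mpr ((singleton_infix_iff _ _).mpr hm)
    set a := orf.takeWhile (· ≠ 'M') with ha
    have hna : 'M' ∉ a := fun h => by simpa using List.mem_takeWhile_imp h
    obtain ⟨b, hb⟩ := dropWhile_mem_decomp orf hm
    have horf : orf = a ++ 'M' :: b := by rw [ha, ← hb, List.takeWhile_append_dropWhile]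
    have hscan : scanSeg orf none = some ('M' :: b) := horf ▸ scanSeg_none_split a b hna
    -- find orf ['M'] = a.length
    have hpos : 0 ≤ PySem.Chars.find orf ['M'] :=
      (PySem.Chars.find_nonneg_iff _ _).mpr ((singleton_infix_iff _ _).mpr hm)
    obtain ⟨hpre, hmin⟩ := PySem.Chars.find_spec hpos
    have hj : (PySem.Chars.find orf ['M']).toNat = a.length := by
      set j := (PySem.Chars.find orf ['M']).toNat with hjdef
      have hle : j ≤ a.length := by
        by_contra hgt
        exact hmin a.length (by omega) (by rw [horf]; simp)
      rcases Nat.lt_or_ge j a.length with hlt | hge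
      · exfalso
        rcases List.cons_prefix_iff.mp hpre with ⟨l', hl', -⟩
        have hhead : orf[j]? = some 'M' := by
          have := congrArg List.head? hl'
          rwa [List.head?_drop] at this
        rw [horf, List.getElem?_append_left hlt] at hhead
        exact hna (List.mem_of_getElem? hhead)
      · omega
    have hfind : PySem.Chars.find orf ['M'] = (a.length : Int) := by omega
    rw [if_pos hin, hscan]
    simp only [getproFlush, hfind]
    have hslice : PySem.Chars.slice orf (some ((a.length : Nat) : Int)) none = 'M' :: b := by
      rw [PySem.Chars.slice_eq_listSlice, PySem.List.slice_from_natCast, horf,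
        List.drop_append_of_le_length (le_refl _)]
      simp
    rw [hslice]
    simp [PySem.Chars.len]
  · have hin : PySem.Chars.isIn ['M'] orf = false := by
      rw [PySem.Chars.isIn_eq_false_iff]
      intro h
      exact hm ((singleton_infix_iff _ _).mp h)
    rw [if_neg (by simp [hin]), scanSeg_none_of_not_mem orf hm]
    rfl

-- B over a '*'-free block
theorem getproGo_starFree (size : Int) (p l : List Char) (out : List String)
    (cur : Option (List Char)) (hp : '*' ∉ p) :
    getproGo size (p ++ l) out cur = getproGo size l out (scanSeg p cur) := by
  induction p generalizing cur with
  | nil => simp [scanSeg]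
  | cons c rest ih =>
    have hc : c ≠ '*' := fun h => hp (h ▸ List.mem_cons_self)
    have hrest : '*' ∉ rest := fun h => hp (List.mem_cons_of_mem c h)
    simp only [List.cons_append, getproGo, if_neg hc, scanSeg]
    cases cur with
    | some cs => exact ih _ hrest
    | none =>
      by_cases hM : c = 'M'
      · simp only [if_pos hM]; exact ih _ hrest
      · simp only [if_neg hM]; exact ih _ hrest

-- B over an intercalated segment list = fold of flush∘scan
theorem getproGo_intercalate (size : Int) (segs : List (List Char)) (out : List String)
    (hne : segs ≠ []) (hfree : ∀ seg ∈ segs, '*' ∉ seg) :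
    getproGo size (List.intercalate ['*'] segs) out none
      = segs.foldl (fun o seg => getproFlush o (scanSeg seg none) size) out := by
  induction segs generalizing out with
  | nil => exact absurd rfl hne
  | cons seg rest ih =>
    cases rest with
    | nil =>
      have h := getproGo_starFree size seg [] out none (hfree seg List.mem_cons_self)
      simpa [List.intercalate, getproGo] using h
    | cons s2 rest' =>
      have h1 : List.intercalate ['*'] (seg :: s2 :: rest')
          = seg ++ '*' :: List.intercalate ['*'] (s2 :: rest') := by
        simp [List.intercalate, List.intersperse]
      rw [h1, getproGo_starFree size seg _ out none (hfree seg List.mem_cons_self),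
        show getproGo size ('*' :: List.intercalate ['*'] (s2 :: rest')) out (scanSeg seg none)
          = getproGo size (List.intercalate ['*'] (s2 :: rest'))
              (getproFlush out (scanSeg seg none) size) none from by simp [getproGo]]
      exact ih _ (by simp) (fun s hs => hfree s (List.mem_cons_of_mem seg hs))

-- ===== VERDICT (by name: the statement is the Claim_ definition above) =====
theorem getpro_spec : Claim_equal_getpro := by
  intro aa size _
  unfold Spec_getpro getpro getpro_alt
  rw [splitOn_eq_splitStar]
  have hB : getproGo size aa.toList [] none
      = (splitStar '*' aa.toList).foldl (fun o seg => getproFlush o (scanSeg seg none) size) [] := by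
    conv_lhs => rw [← splitStar_intercalate '*' aa.toList]
    exact getproGo_intercalate size _ [] (splitStar_ne_nil _ _) (splitStar_starFree _ _)
  rw [hB]
  exact PySem.List.foldl_congr_mem _ _ _ [] (fun subset orf _ => stepA_eq size subset orf)
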